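-- pv_equiv track=rewrite | github.com/prerbazz/CSA0605-DAA | Pdf 26 - Sunset generation.py | subsets_with_element
-- ===== SOURCE A (Python) =====
-- def subsets_with_element(E, x):
--     E.sort()
--     result = []
--
--     def backtrack(start, current):
--         if x in current:
--             result.append(current[:])
--
--
--         for i in range(start, len(E)):
--             current.append(E[i])
--             backtrack(i + 1, current)
--             current.pop()
--
--
--     backtrack(0, [])
--     return result
-- ===== SOURCE B (Python) =====
-- def subsets_with_element(E, x):
--     E.sort()
--
--     def subs(lst):
--         # all subsets of lst, in the lexicographic pre-order of index sequences
--         if not lst: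
--             return [[]]
--         rest = subs(lst[1:])
--         return [[]] + [[lst[0]] + s for s in rest] + rest[1:]
--
--     return [s for s in subs(E) if x in s]
-- ===== Notes on version B (the rewrite author's own statement) =====
-- stated objective: alternative
-- what changed: Replaces the index-based backtracking with mutable accumulator by a pure structural recursion that builds the full subset list of the sorted input in one recurrence ([[]] + cons-mapped + tail) and then filters for membership of x.
import Mathlib
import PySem

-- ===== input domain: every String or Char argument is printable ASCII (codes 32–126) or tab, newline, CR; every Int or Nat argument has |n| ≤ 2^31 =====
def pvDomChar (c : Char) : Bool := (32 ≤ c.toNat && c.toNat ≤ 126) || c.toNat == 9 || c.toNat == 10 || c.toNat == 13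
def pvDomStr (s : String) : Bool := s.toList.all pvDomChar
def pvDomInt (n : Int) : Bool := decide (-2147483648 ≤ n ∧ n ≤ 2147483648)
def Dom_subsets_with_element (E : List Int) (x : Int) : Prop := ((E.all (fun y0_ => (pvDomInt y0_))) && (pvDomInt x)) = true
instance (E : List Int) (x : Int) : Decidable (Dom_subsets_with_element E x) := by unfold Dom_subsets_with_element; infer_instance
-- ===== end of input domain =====

-- B replaces the index-based backtracking (mutable accumulator) by a pure structural
-- recursion producing the pre-order subset list, then a filter; objective: alternative.
-- A sorts E in place (E.sort()); B performs the same mutation, and the claim is about the return value.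


-- ===== PORT A =====
-- backtrack's for-loop over i in range(start, len(E)) is transcribed as recursion over the
-- suffix E[start:]: each iteration appends E[i] to current, recurses with start = i+1 (the
-- emission `if x in current: result.append(current[:])` is inlined at each call), then pops.
def pvBtLoop (x : Int) (current : List Int) : List Int → List (List Int)
  | [] => []
  | a :: t =>
      ((if x ∈ current ++ [a] then [current ++ [a]] else []) ++ pvBtLoop x (current ++ [a]) t)
        ++ pvBtLoop x current t

def subsets_with_element (E : List Int) (x : Int) : List (List Int) :=
  (if x ∈ ([] : List Int) then [([] : List Int)] else [])
    ++ pvBtLoop x [] (PySem.List.sorted E (fun y => y) false)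

-- ===== PORT B =====
def pvSubs : List Int → List (List Int)
  | [] => [[]]
  | a :: t =>
      let rest := pvSubs t
      [] :: (rest.map (fun s => a :: s) ++ rest.drop 1)

def subsets_with_element_alt (E : List Int) (x : Int) : List (List Int) :=
  (pvSubs (PySem.List.sorted E (fun y => y) false)).filter (fun s => decide (x ∈ s))

-- ===== PRECONDITION & SPEC =====
def Spec_subsets_with_element (E : List Int) (x : Int) (out : List (List Int)) : Prop := out = subsets_with_element_alt E x
instance (E : List Int) (x : Int) (out : List (List Int)) : Decidable (Spec_subsets_with_element E x out) := by unfold Spec_subsets_with_element; infer_instance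

-- ===== CLAIM (what is proved, stated in full; the proofs are below) =====
def Claim_equal_subsets_with_element : Prop := ∀ (E : List Int) (x : Int), Dom_subsets_with_element E x → Spec_subsets_with_element E x (subsets_with_element E x)

-- ===== LEMMAS AND PROOFS =====

-- pvSubs always starts with the empty subset.
theorem pvSubs_head (s : List Int) : pvSubs s = [] :: (pvSubs s).drop 1 := by
  cases s <;> simp [pvSubs]

-- The backtracking loop equals the filtered, prefixed tail of the pure subset list.
theorem pvBtLoop_eq (x : Int) (s : List Int) : ∀ (current : List Int),
    pvBtLoop x current s
      = (((pvSubs s).drop 1).map (fun t => current ++ t)).filter (fun t => decide (x ∈ t)) := by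
  induction s with
  | nil => intro current; simp [pvBtLoop, pvSubs]
  | cons a t ih =>
      intro current
      have h1 : pvBtLoop x (current ++ [a]) t
          = (((pvSubs t).drop 1).map (fun u => (current ++ [a]) ++ u)).filter
              (fun u => decide (x ∈ u)) := ih (current ++ [a])
      have h2 : pvBtLoop x current t
          = (((pvSubs t).drop 1).map (fun u => current ++ u)).filter
              (fun u => decide (x ∈ u)) := ih current
      calc pvBtLoop x current (a :: t)
          = ((if x ∈ current ++ [a] then [current ++ [a]] else [])
              ++ pvBtLoop x (current ++ [a]) t) ++ pvBtLoop x current t := rfl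
        _ = (((pvSubs t).map (fun u => (current ++ [a]) ++ u)).filter (fun u => decide (x ∈ u)))
              ++ (((pvSubs t).drop 1).map (fun u => current ++ u)).filter
                  (fun u => decide (x ∈ u)) := by
            rw [h1, h2, pvSubs_head t]
            simp only [List.map_cons, List.filter_cons, List.append_nil, decide_eq_true_eq,
              List.mem_append, List.mem_singleton, List.tail_cons, List.drop_one]
            split_ifs <;> simp
        _ = _ := by
            simp only [pvSubs, List.drop_one, List.tail_cons, List.map_append, List.map_map,
              List.filter_append]
            congr 2
            · apply List.map_congr_left
              intro u _
              simp

-- ===== VERDICT (by name: the statement is the Claim_ definition above) =====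
theorem subsets_with_element_spec : Claim_equal_subsets_with_element := by
  intro E x _
  show subsets_with_element E x = subsets_with_element_alt E x
  unfold subsets_with_element subsets_with_element_alt
  rw [pvBtLoop_eq, pvSubs_head (PySem.List.sorted E (fun y => y) false)]
  simp
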